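-- pv_equiv track=rewrite | github.com/Murali3824/DSA-geeksforgeeks | Difficulty: Easy/Factorials Less than or Equal to n/factorials-less-than-or-equal-to-n.py | factorialNumbers
-- ===== SOURCE A (Python) =====
-- def fact(n):
--     if n==0 or n==1:
--         return 1
--     return n*fact(n-1)
--
-- def factorialNumbers(n):
-- 	l=[]
-- 	for i in range(1,n+1):
-- 	    a=fact(i)
-- 	    if a<=n:
-- 	        l.append(a)
-- 	    else:
-- 	        break
-- 	return l
-- ===== SOURCE B (Python) =====
-- def factorialNumbers(n):
--     l = []
--     f = 1
--     i = 1
--     while True: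
--         f *= i
--         if f <= n:
--             l.append(f)
--             i += 1
--         else:
--             break
--     return l
-- ===== Notes on version B (the rewrite author's own statement) =====
-- stated objective: simpler
-- what changed: Replaces the recursive fact helper recomputed from scratch for each i by a single while-loop maintaining a running product, appending while it stays <= n.
import Mathlib
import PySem

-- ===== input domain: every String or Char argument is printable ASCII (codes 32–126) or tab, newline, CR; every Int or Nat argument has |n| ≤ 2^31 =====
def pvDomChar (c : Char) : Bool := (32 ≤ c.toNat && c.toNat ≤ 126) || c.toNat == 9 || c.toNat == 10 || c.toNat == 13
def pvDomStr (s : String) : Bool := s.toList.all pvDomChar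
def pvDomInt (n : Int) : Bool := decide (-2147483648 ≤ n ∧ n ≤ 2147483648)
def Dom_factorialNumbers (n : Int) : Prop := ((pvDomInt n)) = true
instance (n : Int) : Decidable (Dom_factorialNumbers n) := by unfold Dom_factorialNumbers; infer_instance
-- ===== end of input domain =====

-- B replaces the recursive fact helper (recomputed for each i) by one while-loop
-- with a running product; objective: simpler.


-- ===== PORT A =====
-- fact: the `2 ≤ n` test is only a totality guard (Python recurses forever on
-- negative input; factorialNumbers only calls fact with n ≥ 1).
def factA (n : Int) : Int :=
  if n == 0 || n == 1 then 1
  else if _h : 2 ≤ n then n * factA (n - 1)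
  else 1
termination_by n.toNat
decreasing_by omega

-- the for-loop with break, over range(1, n+1): Python's range is lazy, so the
-- loop is ported as recursion on the current element i with the range length
-- ((n+1)-1).toNat as the remaining-iterations count.
def loopA (n : Int) : Nat → Int → List Int → List Int
  | 0, _, l => l
  | m + 1, i, l =>
      let a := factA i
      if a ≤ n then loopA n m (i + 1) (l ++ [a]) else l

def factorialNumbers (n : Int) : List Int :=
  loopA n (n + 1 - 1).toNat 1 []

-- ===== PORT B =====
-- the while-True loop; fuel = n.toNat + 1 is a pure totality guard: the loop
-- continues only while f*i ≤ n, and then i ≤ n, so at most n iterations happen.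
def loopB (n : Int) : Nat → Int → Int → List Int
  | 0, _, _ => []
  | fuel + 1, f, i =>
      let f' := f * i
      if f' ≤ n then f' :: loopB n fuel f' (i + 1) else []

def factorialNumbers_alt (n : Int) : List Int :=
  loopB n (n.toNat + 1) 1 1

-- ===== PRECONDITION & SPEC =====
def Spec_factorialNumbers (n : Int) (out : List Int) : Prop := out = factorialNumbers_alt n
instance (n : Int) (out : List Int) : Decidable (Spec_factorialNumbers n out) := by unfold Spec_factorialNumbers; infer_instance

-- ===== CLAIM (what is proved, stated in full; the proofs are below) =====
def Claim_equal_factorialNumbers : Prop := ∀ (n : Int), Dom_factorialNumbers n → Spec_factorialNumbers n (factorialNumbers n)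

-- ===== LEMMAS AND PROOFS =====

-- common mathematical reference: the stream of factorials ≥ (i)! kept while ≤ n
def spec (n : Int) (i : Nat) : List Int :=
  if (Nat.factorial i : Int) ≤ n then (Nat.factorial i : Int) :: spec n (i + 1) else []
termination_by n.toNat + 1 - i
decreasing_by
  rename_i h
  have h1 : (i : Int) ≤ (Nat.factorial i : Int) := by exact_mod_cast Nat.self_le_factorial i
  have : (i : Int) ≤ n := le_trans h1 h
  omega

lemma spec_nil {n : Int} {i : Nat} (h : n < (i : Int)) : spec n i = [] := by
  rw [spec]
  have h1 : (i : Int) ≤ (Nat.factorial i : Int) := by exact_mod_cast Nat.self_le_factorial i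
  rw [if_neg (by omega)]

lemma factA_eq (k : Nat) : factA ((k : Int) + 1) = (Nat.factorial (k + 1) : Int) := by
  induction k with
  | zero => simp [factA, Nat.factorial]
  | succ m ih =>
      rw [factA]
      have hc : ((m + 1 : Nat) : Int) + 1 = (m : Int) + 1 + 1 := by push_cast; ring
      rw [hc]
      have h0 : (((m : Int) + 1 + 1) == 0 || ((m : Int) + 1 + 1) == 1) = false := by
        simp; omega
      rw [h0, if_neg (by simp)]
      rw [dif_pos (by omega)]
      have : ((m : Int) + 1 + 1 - 1) = (m : Int) + 1 := by ring
      rw [this, ih]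
      push_cast [Nat.factorial_succ]
      ring

lemma loopA_spec (n : Int) : ∀ (m i : Nat) (acc : List Int), i + m = n.toNat →
    loopA n m ((i : Int) + 1) acc = acc ++ spec n (i + 1) := by
  intro m
  induction m with
  | zero =>
      intro i acc h
      rw [loopA, spec_nil (by push_cast; omega), List.append_nil]
  | succ m ih =>
      intro i acc h
      rw [loopA]
      simp only [factA_eq i]
      by_cases hle : (Nat.factorial (i + 1) : Int) ≤ n
      · rw [if_pos hle]
        have : (i : Int) + 1 + 1 = ((i + 1 : Nat) : Int) + 1 := by push_cast; ring
        rw [this, ih (i + 1) _ (by omega)]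
        conv_rhs => rw [spec]
        rw [if_pos hle]
        simp
      · rw [if_neg hle, spec, if_neg hle, List.append_nil]

lemma loopB_spec (n : Int) : ∀ (fuel i : Nat), n.toNat + 1 ≤ fuel + i →
    loopB n fuel (Nat.factorial i : Int) ((i : Int) + 1) = spec n (i + 1) := by
  intro fuel
  induction fuel with
  | zero =>
      intro i h
      rw [loopB, spec_nil (by push_cast; omega)]
  | succ fuel ih =>
      intro i h
      rw [loopB]
      have hf : (Nat.factorial i : Int) * ((i : Int) + 1) = (Nat.factorial (i + 1) : Int) := by
        push_cast [Nat.factorial_succ]; ring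
      simp only [hf]
      by_cases hle : (Nat.factorial (i + 1) : Int) ≤ n
      · rw [if_pos hle]
        have hi : ((i : Int) + 1) ≤ (Nat.factorial (i + 1) : Int) := by
          exact_mod_cast Nat.self_le_factorial (i + 1)
        have : ((i + 1 : Nat) : Int) + 1 = (i : Int) + 1 + 1 := by push_cast; ring
        rw [← this, ih (i + 1) (by omega)]
        conv_rhs => rw [spec]
        rw [if_pos hle]
      · rw [if_neg hle, spec, if_neg hle]

-- ===== VERDICT (by name: the statement is the Claim_ definition above) =====
theorem factorialNumbers_spec : Claim_equal_factorialNumbers := by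
  intro n _
  unfold Spec_factorialNumbers factorialNumbers factorialNumbers_alt
  have hA := loopA_spec n n.toNat 0 [] (by omega)
  have he : (n + 1 - 1).toNat = n.toNat := by omega
  rw [he]
  have hB := loopB_spec n (n.toNat + 1) 0 (by omega)
  simp only [Nat.cast_zero, zero_add, Nat.factorial_zero, Nat.cast_one, List.nil_append] at hA hB
  rw [hA, hB]
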